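-- pv_equiv track=rewrite | github.com/lines17/Hello-World | backtrackingAlgorithm.py | updateSudoku
-- ===== SOURCE A (Python) =====
-- def updateSudoku(sudoku, asignadas):
--     """imprime is a function to display and asign the sudoku solved
--
--     @param dict_result: will contain the sudoku solved in a dictionary structure
--     @param sudoku:
--     @param asignadas:
--
--     @return: a dictionary with the sudoku solved where the Key is the Row and column of sudokugame and Value is the number asigned to solve sudoku
--     """
--     for fila in range(0,len(sudoku)):
--         for columna in range(0,len(sudoku)):
--             if sudoku[fila][columna] == 0:
--                 for a in asignadas:
--                     if a[0] == fila and a[1] == columna: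
--                         sudoku[fila][columna] = a[2]
--     return sudoku
-- ===== SOURCE B (Python) =====
-- def updateSudoku(sudoku, asignadas):
--     # One pass over the assignment list instead of a triple nested grid scan:
--     # collect the zero-cell coordinates once, then apply each assignment whose
--     # coordinate is a zero cell (later assignments overwrite earlier ones).
--     n = len(sudoku)
--     zeros = {(i, j) for i in range(n) for j in range(n) if sudoku[i][j] == 0}
--     for a in asignadas:
--         if (a[0], a[1]) in zeros:
--             sudoku[a[0]][a[1]] = a[2]
--     return sudoku
-- ===== Notes on version B (the rewrite author's own statement) =====
-- stated objective: alternative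
-- what changed: B inverts the iteration: instead of A's triple nested loop (grid cells x full scan of asignadas per zero cell), B collects the zero-cell coordinates in one grid pass and then makes a single pass over asignadas, applying each assignment whose coordinate is a zero cell (later assignments overwrite earlier ones, preserving last-wins).
import Mathlib
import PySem

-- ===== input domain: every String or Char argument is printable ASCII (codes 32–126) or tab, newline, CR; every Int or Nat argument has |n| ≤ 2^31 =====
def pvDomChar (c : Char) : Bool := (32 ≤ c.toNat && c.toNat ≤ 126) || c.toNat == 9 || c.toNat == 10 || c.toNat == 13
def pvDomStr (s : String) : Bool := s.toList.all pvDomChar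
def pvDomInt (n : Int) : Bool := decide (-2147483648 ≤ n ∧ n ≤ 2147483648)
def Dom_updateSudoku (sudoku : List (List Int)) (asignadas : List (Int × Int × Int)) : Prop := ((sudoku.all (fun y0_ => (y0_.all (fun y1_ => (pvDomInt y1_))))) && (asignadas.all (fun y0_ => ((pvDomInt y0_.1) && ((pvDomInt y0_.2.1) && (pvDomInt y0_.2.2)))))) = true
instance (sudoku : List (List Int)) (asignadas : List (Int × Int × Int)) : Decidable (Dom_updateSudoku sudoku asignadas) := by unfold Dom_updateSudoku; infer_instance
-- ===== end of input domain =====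

-- B inverts the iteration: one grid pass collects the zero cells, then a single pass over asignadas applies matching assignments (last wins); both Pythons mutate `sudoku` in place identically, the equivalence proved is about the return value.


-- ===== PORT A =====
def updateSudoku (sudoku : List (List Int)) (asignadas : List (Int × Int × Int)) : List (List Int) :=
  (PySem.List.pyRange 0 (sudoku.length : Int) 1).foldl (fun g fila =>
    (PySem.List.pyRange 0 (sudoku.length : Int) 1).foldl (fun g columna =>
      if PySem.List.pyGetD (PySem.List.pyGetD g fila []) columna 0 = 0 then
        asignadas.foldl (fun g a =>
          if a.1 = fila ∧ a.2.1 = columna then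
            PySem.List.pySetD g fila (PySem.List.pySetD (PySem.List.pyGetD g fila []) columna a.2.2)
          else g) g
      else g) g) sudoku

-- ===== PORT B =====
-- the set comprehension {(i, j) for i in range(n) for j in range(n) if sudoku[i][j] == 0}
def zeroCells (sudoku : List (List Int)) : PySem.Set (Int × Int) :=
  PySem.Set.ofList ((PySem.List.pyRange 0 (sudoku.length : Int) 1).flatMap (fun i =>
    (PySem.List.pyRange 0 (sudoku.length : Int) 1).filterMap (fun j =>
      if PySem.List.pyGetD (PySem.List.pyGetD sudoku i []) j 0 = 0 then some (i, j) else none)))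

def updateSudoku_alt (sudoku : List (List Int)) (asignadas : List (Int × Int × Int)) : List (List Int) :=
  let zeros := zeroCells sudoku
  asignadas.foldl (fun g a =>
    if zeros.contains (a.1, a.2.1) then
      PySem.List.pySetD g a.1 (PySem.List.pySetD (PySem.List.pyGetD g a.1 []) a.2.1 a.2.2)
    else g) sudoku

-- ===== PRECONDITION & SPEC =====
-- Pre_ excludes ragged grids where some row is shorter than len(sudoku): there Python A (and Python B) raise IndexError.
def Pre_updateSudoku (sudoku : List (List Int)) (asignadas : List (Int × Int × Int)) : Prop :=
  ∀ row ∈ sudoku, sudoku.length ≤ row.length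
instance (sudoku : List (List Int)) (asignadas : List (Int × Int × Int)) : Decidable (Pre_updateSudoku sudoku asignadas) := by unfold Pre_updateSudoku; infer_instance

def pvWitness_updateSudoku : List (List Int) × (List (Int × Int × Int)) :=
  ([[0, 1], [2, 0]], [(0, 0, 5), (1, 1, 3)])

def Spec_updateSudoku (sudoku : List (List Int)) (asignadas : List (Int × Int × Int)) (out : List (List Int)) : Prop := out = updateSudoku_alt sudoku asignadas
instance (sudoku : List (List Int)) (asignadas : List (Int × Int × Int)) (out : List (List Int)) : Decidable (Spec_updateSudoku sudoku asignadas out) := by unfold Spec_updateSudoku; infer_instance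

-- ===== CLAIM (what is proved, stated in full; the proofs are below) =====
def Claim_equal_updateSudoku : Prop := ∀ (sudoku : List (List Int)) (asignadas : List (Int × Int × Int)), Dom_updateSudoku sudoku asignadas → Pre_updateSudoku sudoku asignadas → Spec_updateSudoku sudoku asignadas (updateSudoku sudoku asignadas)

-- ===== LEMMAS AND PROOFS =====

-- last value assigned to coordinate `key` by the list, if any
def lastOpt (asign : List (Int × Int × Int)) (key : Int × Int) : Option Int :=
  asign.foldl (fun o a => if (a.1, a.2.1) = key then some a.2.2 else o) none

theorem set_getD_self {α : Type} (l : List α) (i : Nat) (d : α) : l.set i (l.getD i d) = l := by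
  rcases lt_or_ge i l.length with h | h
  · rw [List.getD_eq_getElem l d h]; exact List.set_getElem_self h
  · exact List.set_eq_of_length_le h

theorem getD_set_ne {α : Type} (l : List α) (i j : Nat) (v d : α) (h : i ≠ j) :
    (l.set i v).getD j d = l.getD j d := by
  simp [List.getD, List.getElem?_set, h]

theorem getD_set_self {α : Type} (l : List α) (i : Nat) (v d : α) (h : i < l.length) :
    (l.set i v).getD i d = v := by
  simp [List.getD, List.getElem?_set, h]

theorem lastOpt_foldl (asign : List (Int × Int × Int)) (key : Int × Int) (o : Option Int) :
    asign.foldl (fun o a => if (a.1, a.2.1) = key then some a.2.2 else o) o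
      = (lastOpt asign key).or o := by
  induction asign generalizing o with
  | nil => simp [lastOpt]
  | cons a rest ih =>
    simp only [lastOpt, List.foldl_cons]
    by_cases hm : (a.1, a.2.1) = key
    · rw [if_pos hm, if_pos hm, ih (some a.2.2), Option.or_assoc, Option.some_or]
    · rw [if_neg hm, if_neg hm, ih o, ih none, Option.or_none]

theorem lastOpt_cons_match (a : Int × Int × Int) (rest : List (Int × Int × Int)) (key : Int × Int)
    (h : (a.1, a.2.1) = key) :
    lastOpt (a :: rest) key = (lastOpt rest key).or (some a.2.2) := by
  simp only [lastOpt, List.foldl_cons, if_pos h]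
  exact lastOpt_foldl rest key (some a.2.2)

theorem lastOpt_cons_miss (a : Int × Int × Int) (rest : List (Int × Int × Int)) (key : Int × Int)
    (h : (a.1, a.2.1) ≠ key) : lastOpt (a :: rest) key = lastOpt rest key := by
  simp only [lastOpt, List.foldl_cons, if_neg h]

-- A's innermost fold over asignadas for a fixed cell (i, j)
theorem innerA (asign : List (Int × Int × Int)) (i j : Nat) (g : List (List Int)) :
    asign.foldl (fun g a =>
        if a.1 = (i : Int) ∧ a.2.1 = (j : Int) then g.set i ((g.getD i []).set j a.2.2) else g) g
      = g.set i ((g.getD i []).set j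
          ((lastOpt asign ((i : Int), (j : Int))).getD ((g.getD i []).getD j 0))) := by
  induction asign generalizing g with
  | nil =>
    simp only [lastOpt, List.foldl_nil, Option.getD_none, set_getD_self]
  | cons a rest ih =>
    simp only [List.foldl_cons]
    by_cases hm : a.1 = (i : Int) ∧ a.2.1 = (j : Int)
    · rw [if_pos hm, ih]
      have hkey : (a.1, a.2.1) = ((i : Int), (j : Int)) := by rw [hm.1, hm.2]
      rw [lastOpt_cons_match a rest _ hkey]
      rcases lt_or_ge i g.length with hi | hi
      · have hrow : (g.set i ((g.getD i []).set j a.2.2)).getD i []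
            = (g.getD i []).set j a.2.2 := getD_set_self g i _ [] hi
        rw [hrow, List.set_set]
        rcases lt_or_ge j (g.getD i []).length with hj | hj
        · rw [List.set_set]
          rw [getD_set_self _ j _ 0 hj]
          congr 1
          cases lastOpt rest ((i : Int), (j : Int)) <;> simp
        · have hset : ∀ v : Int, (g.getD i []).set j v = g.getD i [] :=
            fun v => List.set_eq_of_length_le hj
          simp only [hset]
      · have hset : ∀ r : List Int, g.set i r = g := fun r => List.set_eq_of_length_le hi
        simp only [hset]
    · rw [if_neg hm, ih]
      have hkey : (a.1, a.2.1) ≠ ((i : Int), (j : Int)) := by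
        intro h
        exact hm ⟨congrArg Prod.fst h, congrArg (fun p => p.2) h⟩
      rw [lastOpt_cons_miss a rest _ hkey]

-- the per-row column fold that A's nested loops amount to
def rstep (asign : List (Int × Int × Int)) (i : Nat) (r : List Int) (j : Nat) : List Int :=
  if r.getD j 0 = 0 then r.set j ((lastOpt asign ((i : Int), (j : Int))).getD 0) else r

theorem length_rstep (asign : List (Int × Int × Int)) (i : Nat) (r : List Int) (j : Nat) :
    (rstep asign i r j).length = r.length := by
  unfold rstep; split <;> simp

theorem length_colFold (asign : List (Int × Int × Int)) (i : Nat) (cols : List Nat) (r : List Int) :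
    (cols.foldl (rstep asign i) r).length = r.length := by
  induction cols generalizing r with
  | nil => rfl
  | cons c cs ih => rw [List.foldl_cons, ih, length_rstep]

-- cell value after the column fold
theorem colFold_getD (asign : List (Int × Int × Int)) (i : Nat) (cols : List Nat) (r : List Int)
    (hnd : cols.Nodup) (hlt : ∀ c ∈ cols, c < r.length) (j : Nat) :
    (cols.foldl (rstep asign i) r).getD j 0
      = if j ∈ cols ∧ r.getD j 0 = 0 then (lastOpt asign ((i : Int), (j : Int))).getD 0
        else r.getD j 0 := by
  induction cols generalizing r with
  | nil => simp
  | cons c cs ih =>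
    rw [List.foldl_cons]
    have hnd' := (List.nodup_cons.mp hnd).2
    have hcnot := (List.nodup_cons.mp hnd).1
    have hlt' : ∀ x ∈ cs, x < (rstep asign i r c).length := by
      rw [length_rstep]; exact fun x hx => hlt x (List.mem_cons_of_mem c hx)
    rw [ih _ hnd' hlt']
    by_cases hjc : j = c
    · subst hjc
      have hj : j < r.length := hlt j List.mem_cons_self
      have hjn : j ∉ cs := hcnot
      rw [if_neg (fun h => hjn h.1)]
      unfold rstep
      by_cases hz : r.getD j 0 = 0
      · rw [if_pos hz, if_pos ⟨List.mem_cons_self, hz⟩, getD_set_self _ j _ 0 hj]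
      · rw [if_neg hz, if_neg (fun h => hz h.2)]
    · have hstep : (rstep asign i r c).getD j 0 = r.getD j 0 := by
        unfold rstep; split
        · exact getD_set_ne r c j _ 0 (fun h => hjc h.symm)
        · rfl
      rw [hstep]
      by_cases hjs : j ∈ cs
      · by_cases hz : r.getD j 0 = 0
        · rw [if_pos ⟨hjs, hz⟩, if_pos ⟨List.mem_cons_of_mem c hjs, hz⟩]
        · rw [if_neg (fun h => hz h.2), if_neg (fun h => hz h.2)]
      · rw [if_neg (fun h => hjs h.1),
          if_neg (fun h => (by rcases List.mem_cons.mp h.1 with h' | h' <;> [exact hjc h'; exact hjs h'] : False))]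

-- A's cell step for row i, column j (after innerA has been applied)
def cellStep (asign : List (Int × Int × Int)) (i : Nat) (g : List (List Int)) (j : Nat) :
    List (List Int) :=
  if (g.getD i []).getD j 0 = 0 then
    g.set i ((g.getD i []).set j
      ((lastOpt asign ((i : Int), (j : Int))).getD ((g.getD i []).getD j 0)))
  else g

theorem cellStep_eq_set_rstep (asign : List (Int × Int × Int)) (i : Nat) (g : List (List Int))
    (j : Nat) : cellStep asign i g j = g.set i (rstep asign i (g.getD i []) j) := by
  unfold cellStep rstep
  by_cases hz : (g.getD i []).getD j 0 = 0
  · rw [if_pos hz, if_pos hz, hz]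
  · rw [if_neg hz, if_neg hz, set_getD_self]

-- the row fold localises to the row
theorem rowFold (asign : List (Int × Int × Int)) (i : Nat) (cols : List Nat)
    (g : List (List Int)) (hi : i < g.length) :
    cols.foldl (cellStep asign i) g = g.set i (cols.foldl (rstep asign i) (g.getD i [])) := by
  induction cols generalizing g with
  | nil => exact (set_getD_self g i []).symm
  | cons c cs ih =>
    rw [List.foldl_cons, cellStep_eq_set_rstep, List.foldl_cons]
    have hi' : i < (g.set i (rstep asign i (g.getD i []) c)).length := by simpa using hi
    rw [ih _ hi', List.set_set, getD_set_self g i _ [] hi]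

-- the outer row fold touches each row once
def rowStep (asign : List (Int × Int × Int)) (g : List (List Int)) (i : Nat) : List (List Int) :=
  g.set i ((List.range g.length).foldl (rstep asign i) (g.getD i []))

theorem length_gridFold (asign : List (Int × Int × Int)) (f : List (List Int) → Nat → List (List Int))
    (hf : ∀ g i, (f g i).length = g.length) (rows : List Nat) (g : List (List Int)) :
    (rows.foldl f g).length = g.length := by
  induction rows generalizing g with
  | nil => rfl
  | cons r rs ih => rw [List.foldl_cons, ih, hf]

-- B's step over one assignment
def bStep (zeros : PySem.Set (Int × Int)) (g : List (List Int)) (a : Int × Int × Int) :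
    List (List Int) :=
  if zeros.contains (a.1, a.2.1) then
    PySem.List.pySetD g a.1 (PySem.List.pySetD (PySem.List.pyGetD g a.1 []) a.2.1 a.2.2)
  else g

-- membership in the zero-cell set, in Nat form
theorem mem_zeroCells (sudoku : List (List Int)) (x y : Int) :
    (zeroCells sudoku).contains (x, y) = true
      ↔ ∃ i j : Nat, x = (i : Int) ∧ y = (j : Int) ∧ i < sudoku.length ∧ j < sudoku.length ∧
          (sudoku.getD i []).getD j 0 = 0 := by
  rw [PySem.Set.contains_iff]
  unfold zeroCells
  rw [PySem.Set.mem_ofList, List.mem_flatMap]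
  constructor
  · rintro ⟨i', hi', hmem⟩
    rw [List.mem_filterMap] at hmem
    obtain ⟨j', hj', hjeq⟩ := hmem
    rw [PySem.List.mem_pyRange_one] at hi' hj'
    obtain ⟨i, rfl⟩ : ∃ i : Nat, i' = (i : Int) := ⟨i'.toNat, (Int.toNat_of_nonneg hi'.1).symm⟩
    obtain ⟨j, rfl⟩ : ∃ j : Nat, j' = (j : Int) := ⟨j'.toNat, (Int.toNat_of_nonneg hj'.1).symm⟩
    split at hjeq
    · rename_i hz
      obtain ⟨hx, hy⟩ := Prod.mk.injEq .. ▸ Option.some.injEq .. ▸ hjeq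
      refine ⟨i, j, hx.symm, hy.symm, by exact_mod_cast hi'.2, by exact_mod_cast hj'.2, ?_⟩
      simpa using hz
    · exact absurd hjeq (by simp)
  · rintro ⟨i, j, rfl, rfl, hi, hj, hz⟩
    refine ⟨(i : Int), ?_, ?_⟩
    · rw [PySem.List.mem_pyRange_one]; exact ⟨by positivity, by exact_mod_cast hi⟩
    · rw [List.mem_filterMap]
      refine ⟨(j : Int), ?_, ?_⟩
      · rw [PySem.List.mem_pyRange_one]; exact ⟨by positivity, by exact_mod_cast hj⟩
      · simp only [PySem.List.pyGetD_natCast]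
        rw [if_pos hz]

theorem length_bFold (zeros : PySem.Set (Int × Int)) (asign : List (Int × Int × Int))
    (g : List (List Int)) : (asign.foldl (bStep zeros) g).length = g.length := by
  induction asign generalizing g with
  | nil => rfl
  | cons a rest ih =>
    rw [List.foldl_cons, ih]
    unfold bStep; split
    · simp [PySem.List.length_pySetD]
    · rfl

theorem rowlen_set (g : List (List Int)) (i₀ : Nat) (r : List Int) (k : Nat)
    (hr : r.length = (g.getD i₀ []).length) :
    ((g.set i₀ r).getD k []).length = (g.getD k []).length := by
  by_cases hk : k = i₀
  · subst hk
    rcases lt_or_ge k g.length with h | h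
    · rw [getD_set_self g k r [] h, hr]
    · rw [List.set_eq_of_length_le h]
  · rw [getD_set_ne g i₀ k r [] (fun h => hk h.symm)]

-- value of cell (i, j) after B's fold
theorem bFold_getD (sudoku : List (List Int)) (asign : List (Int × Int × Int))
    (g : List (List Int)) (i j : Nat)
    (hlen : g.length = sudoku.length)
    (hrow : ∀ k, (g.getD k []).length = (sudoku.getD k []).length)
    (hpre : ∀ row ∈ sudoku, sudoku.length ≤ row.length) :
    ((asign.foldl (bStep (zeroCells sudoku)) g).getD i []).getD j 0
      = if (zeroCells sudoku).contains ((i : Int), (j : Int)) = true then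
          (lastOpt asign ((i : Int), (j : Int))).getD ((g.getD i []).getD j 0)
        else (g.getD i []).getD j 0 := by
  induction asign generalizing g with
  | nil => simp [lastOpt]
  | cons a rest ih =>
    rw [List.foldl_cons]
    by_cases hc : (zeroCells sudoku).contains (a.1, a.2.1) = true
    · obtain ⟨i₀, j₀, hx, hy, hi₀, hj₀, _⟩ := (mem_zeroCells sudoku a.1 a.2.1).mp hc
      have hstep : bStep (zeroCells sudoku) g a
          = g.set i₀ ((g.getD i₀ []).set j₀ a.2.2) := by
        unfold bStep
        rw [if_pos hc, hx, hy, PySem.List.pyGetD_natCast, PySem.List.pySetD_natCast,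
          PySem.List.pySetD_natCast]
      have hlen' : (bStep (zeroCells sudoku) g a).length = sudoku.length := by
        rw [hstep]; simpa using hlen
      have hrow' : ∀ k, ((bStep (zeroCells sudoku) g a).getD k []).length
          = (sudoku.getD k []).length := fun k => by
        rw [hstep, rowlen_set g i₀ _ k (by simp)]; exact hrow k
      rw [ih _ hlen' hrow']
      have hi₀len : i₀ < g.length := by omega
      have hj₀len : j₀ < (g.getD i₀ []).length := by
        rw [hrow i₀]
        have : sudoku.getD i₀ [] ∈ sudoku := by
          rw [List.getD_eq_getElem sudoku [] hi₀]; exact List.getElem_mem hi₀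
        exact lt_of_lt_of_le hj₀ (hpre _ this)
      by_cases hm : (a.1, a.2.1) = ((i : Int), (j : Int))
      · have hii : i₀ = i := by
          have h1 : a.1 = (i : Int) := congrArg Prod.fst hm
          rw [hx] at h1; exact_mod_cast h1
        have hjj : j₀ = j := by
          have h2 : a.2.1 = (j : Int) := congrArg Prod.snd hm
          rw [hy] at h2; exact_mod_cast h2
        subst hii; subst hjj
        have hcz : (zeroCells sudoku).contains ((i₀ : Int), (j₀ : Int)) = true := by
          rwa [← hx, ← hy]
        rw [if_pos hcz, if_pos hcz, lastOpt_cons_match a rest _ hm]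
        have hval : ((bStep (zeroCells sudoku) g a).getD i₀ []).getD j₀ 0 = a.2.2 := by
          rw [hstep, getD_set_self g i₀ _ [] hi₀len, getD_set_self _ j₀ _ 0 hj₀len]
        rw [hval]
        cases lastOpt rest ((i₀ : Int), (j₀ : Int)) with
        | none => rfl
        | some v => rfl
      · have hval : ((bStep (zeroCells sudoku) g a).getD i []).getD j 0
            = (g.getD i []).getD j 0 := by
          rw [hstep]
          by_cases hii : i₀ = i
          · subst hii
            have hjj : j₀ ≠ j := fun h => hm (by rw [hx, hy, h])
            rw [getD_set_self g i₀ _ [] hi₀len, getD_set_ne _ j₀ j _ 0 hjj]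
          · rw [getD_set_ne g i₀ i _ [] hii]
        rw [lastOpt_cons_miss a rest _ hm, hval]
    · have hstep : bStep (zeroCells sudoku) g a = g := by unfold bStep; rw [if_neg hc]
      rw [hstep, ih g hlen hrow]
      by_cases hcz : (zeroCells sudoku).contains ((i : Int), (j : Int)) = true
      · have hm : (a.1, a.2.1) ≠ ((i : Int), (j : Int)) := fun h => hc (h ▸ hcz)
        rw [if_pos hcz, if_pos hcz, lastOpt_cons_miss a rest _ hm]
      · rw [if_neg hcz, if_neg hcz]

theorem length_cellFold (asign : List (Int × Int × Int)) (i : Nat) (cols : List Nat)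
    (g : List (List Int)) : (cols.foldl (cellStep asign i) g).length = g.length := by
  induction cols generalizing g with
  | nil => rfl
  | cons c cs ih =>
    rw [List.foldl_cons, ih]
    unfold cellStep; split <;> simp

-- row k of A's grid fold
theorem A_rows (asign : List (Int × Int × Int)) (cols rows : List Nat) (g : List (List Int))
    (hrows : ∀ i ∈ rows, i < g.length) (hnd : rows.Nodup) (k : Nat) :
    (rows.foldl (fun g i => cols.foldl (cellStep asign i) g) g).getD k []
      = if k ∈ rows then cols.foldl (rstep asign k) (g.getD k []) else g.getD k [] := by
  induction rows generalizing g with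
  | nil => simp
  | cons r rs ih =>
    rw [List.foldl_cons]
    have hr : r < g.length := hrows r List.mem_cons_self
    rw [rowFold asign r cols g hr]
    have hnd' := (List.nodup_cons.mp hnd).2
    have hrnot := (List.nodup_cons.mp hnd).1
    have hrows' : ∀ i ∈ rs, i < (g.set r (cols.foldl (rstep asign r) (g.getD r []))).length := by
      simpa using fun i hi => hrows i (List.mem_cons_of_mem r hi)
    rw [ih _ hrows' hnd']
    by_cases hk : k = r
    · subst hk
      rw [if_neg hrnot, if_pos List.mem_cons_self, getD_set_self g k _ [] hr]
    · rw [getD_set_ne g r k _ [] (fun h => hk h.symm)]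
      by_cases hks : k ∈ rs
      · rw [if_pos hks, if_pos (List.mem_cons_of_mem r hks)]
      · rw [if_neg hks,
          if_neg (fun h => (by rcases List.mem_cons.mp h with h' | h' <;> [exact hk h'; exact hks h'] : False))]

-- row lengths after B's fold
theorem rowlen_bFold (sudoku : List (List Int)) (asign : List (Int × Int × Int))
    (g : List (List Int)) (hlen : g.length = sudoku.length)
    (hrow : ∀ k, (g.getD k []).length = (sudoku.getD k []).length) (k : Nat) :
    ((asign.foldl (bStep (zeroCells sudoku)) g).getD k []).length
      = (sudoku.getD k []).length := by
  induction asign generalizing g with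
  | nil => exact hrow k
  | cons a rest ih =>
    rw [List.foldl_cons]
    by_cases hc : (zeroCells sudoku).contains (a.1, a.2.1) = true
    · obtain ⟨i₀, j₀, hx, hy, hi₀, hj₀, _⟩ := (mem_zeroCells sudoku a.1 a.2.1).mp hc
      have hstep : bStep (zeroCells sudoku) g a
          = g.set i₀ ((g.getD i₀ []).set j₀ a.2.2) := by
        unfold bStep
        rw [if_pos hc, hx, hy, PySem.List.pyGetD_natCast, PySem.List.pySetD_natCast,
          PySem.List.pySetD_natCast]
      exact ih _ (by rw [hstep]; simpa using hlen)
        (fun m => by rw [hstep, rowlen_set g i₀ _ m (by simp)]; exact hrow m)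
    · have hstep : bStep (zeroCells sudoku) g a = g := by unfold bStep; rw [if_neg hc]
      rw [hstep]; exact ih g hlen hrow

-- ===== VERDICT (by name: the statement is the Claim_ definition above) =====
theorem updateSudoku_spec : Claim_equal_updateSudoku := by
  intro s asign _hDom hpre
  unfold Spec_updateSudoku
  have hA : updateSudoku s asign
      = (List.range s.length).foldl
          (fun g i => (List.range s.length).foldl (cellStep asign i) g) s := by
    unfold updateSudoku cellStep
    rw [PySem.List.pyRange_zero_natCast]
    simp only [List.foldl_map, PySem.List.pyGetD_natCast, PySem.List.pySetD_natCast, innerA]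
  have hB : updateSudoku_alt s asign = asign.foldl (bStep (zeroCells s)) s := rfl
  rw [hA, hB]
  have hlenA : ((List.range s.length).foldl
      (fun g i => (List.range s.length).foldl (cellStep asign i) g) s).length = s.length :=
    length_gridFold asign _ (fun g i => length_cellFold asign i _ g) _ s
  have hlenB : (asign.foldl (bStep (zeroCells s)) s).length = s.length :=
    length_bFold (zeroCells s) asign s
  apply List.ext_getElem (by rw [hlenA, hlenB])
  intro k hk1 hk2
  have hkn : k < s.length := by rwa [hlenA] at hk1
  have hrowmem : s.getD k [] ∈ s := by
    rw [List.getD_eq_getElem s [] hkn]; exact List.getElem_mem hkn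
  have hklen : s.length ≤ (s.getD k []).length := hpre _ hrowmem
  rw [← List.getD_eq_getElem _ [] hk1, ← List.getD_eq_getElem _ [] hk2]
  rw [A_rows asign (List.range s.length) (List.range s.length) s
    (fun i hi => List.mem_range.mp hi) (List.nodup_range) k]
  rw [if_pos (List.mem_range.mpr hkn)]
  -- rows elementwise
  have hrlenA : (( (List.range s.length).foldl (rstep asign k) (s.getD k []))).length
      = (s.getD k []).length := length_colFold asign k _ _
  have hrlenB : ((asign.foldl (bStep (zeroCells s)) s).getD k []).length
      = (s.getD k []).length := rowlen_bFold s asign s rfl (fun _ => rfl) k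
  apply List.ext_getElem (by rw [hrlenA, hrlenB])
  intro j hj1 hj2
  rw [← List.getD_eq_getElem _ 0 hj1, ← List.getD_eq_getElem _ 0 hj2]
  rw [colFold_getD asign k (List.range s.length) (s.getD k []) List.nodup_range
    (fun c hc => lt_of_lt_of_le (List.mem_range.mp hc) hklen) j]
  rw [bFold_getD s asign s k j rfl (fun _ => rfl) hpre]
  by_cases hz : j < s.length ∧ (s.getD k []).getD j 0 = 0
  · have hcz : (zeroCells s).contains ((k : Int), (j : Int)) = true :=
      (mem_zeroCells s k j).mpr ⟨k, j, rfl, rfl, hkn, hz.1, hz.2⟩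
    rw [if_pos ⟨List.mem_range.mpr hz.1, hz.2⟩, if_pos hcz, hz.2]
  · have hcz : ¬ (zeroCells s).contains ((k : Int), (j : Int)) = true := by
      intro hcz
      obtain ⟨i', j', hx, hy, _, hj', hv⟩ := (mem_zeroCells s k j).mp hcz
      have : i' = k := by exact_mod_cast hx.symm
      have hjj : j' = j := by exact_mod_cast hy.symm
      subst this; subst hjj
      exact hz ⟨hj', hv⟩
    rw [if_neg (fun h => hz ⟨List.mem_range.mp h.1, h.2⟩), if_neg hcz]
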